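-- pv_equiv track=rewrite | github.com/aiwithqasim/PIAIC-Artificial-Intelligence | Q1/batch1/assignment/labs109.py | spread_the_coins
-- ===== SOURCE A (Python) =====
-- def spread_the_coins(pile,left,right):
--     start=i=0
--     while i <(len(pile)):
--         k = pile[i]//(left+right)
--         if k>0:
--             pile[i]-=k*(left+right)
--             if i!=len(pile)-1:
--                 pile[i+1] += k*right
--             else:
--                 pile.append(k*right)
--             if i!=0:
--                 pile[i-1] += k*left
--                 i-=1
--                 continue
--             else:
--                 start-=1
--                 pile.insert(0,k*left)
--                 continue
--         i+=1
--     return(start,pile)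
-- ===== SOURCE B (Python) =====
-- def spread_the_coins(pile, left, right):
--     # Cursor zipper held as two stacks: `before` holds the prefix (top = cell just
--     # left of the cursor), `after` holds the suffix reversed (top = cursor cell).
--     # Firing pushes/pops on the stacks; no index arithmetic, insert(0,..) or
--     # mid-list writes. Mutates `pile` in place at the end (pile[:] = ...) and
--     # returns it, like A.
--     before = []
--     after = pile[::-1]
--     start = 0
--     while after:
--         c = after.pop()
--         k = c // (left + right)
--         if k <= 0:
--             before.append(c)
--             continue
--         c -= k * (left + right)
--         if after:
--             after[-1] += k * right
--         else:
--             after.append(k * right)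
--         after.append(c)
--         if before:
--             after.append(before.pop() + k * left)
--         else:
--             start -= 1
--             after.append(k * left)
--     pile[:] = before
--     return (start, pile)
-- ===== Notes on version B (the rewrite author's own statement) =====
-- stated objective: alternative
-- what changed: A walks one mutable list with an index that steps back after each firing, using pile[i] indexing, insert(0,..) and append; B keeps a cursor zipper of two stacks (prefix, reversed suffix headed by the cursor) and fires with O(1) pushes/pops, never indexing or shifting, writing the prefix back into pile at the end.
import Mathlib
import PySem

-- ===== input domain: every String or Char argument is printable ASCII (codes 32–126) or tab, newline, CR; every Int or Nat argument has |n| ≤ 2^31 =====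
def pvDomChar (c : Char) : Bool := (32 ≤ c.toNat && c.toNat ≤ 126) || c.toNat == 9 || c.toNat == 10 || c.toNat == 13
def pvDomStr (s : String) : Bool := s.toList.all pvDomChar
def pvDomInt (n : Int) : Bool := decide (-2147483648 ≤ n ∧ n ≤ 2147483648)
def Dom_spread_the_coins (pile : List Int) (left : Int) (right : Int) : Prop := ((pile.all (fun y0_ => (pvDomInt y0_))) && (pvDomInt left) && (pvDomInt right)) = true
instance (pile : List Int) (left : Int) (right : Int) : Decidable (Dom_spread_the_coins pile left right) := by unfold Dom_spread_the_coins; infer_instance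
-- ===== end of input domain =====

-- B replaces A's index arithmetic on one mutated list (back-stepping i, insert(0,·), append) by a
-- cursor zipper — a reversed prefix and a suffix list, never indexing (objective: alternative;
-- both Pythons mutate the passed list in place and also return it — the theorems are about the return value).

-- Fuel bound shared by both loop ports; it only makes the recursions total (both loops stop on
-- their own condition) and comfortably dominates the iteration count wherever Python A terminates.
def pvFuel (pile : List Int) : Nat := ((pile.map Int.natAbs).sum + pile.length + 2) ^ 3

-- ===== PORT A =====
-- A's while loop, step for step; i is the cursor index into the one mutated list.
def spreadLoopA (fuel : Nat) (start : Int) (i : Nat) (pile : List Int) (left right : Int) : Int × List Int :=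
  match fuel with
  | 0 => (start, pile)
  | Nat.succ fuel' =>
    if i < pile.length then
      let k := PySem.Int.floordiv (pile.getD i 0) (left + right)
      if 0 < k then
        let p1 := pile.set i (pile.getD i 0 - k * (left + right))
        let p2 := if i ≠ pile.length - 1
                  then p1.set (i+1) (p1.getD (i+1) 0 + k * right)
                  else p1 ++ [k * right]
        if i ≠ 0 then
          spreadLoopA fuel' start (i-1) (p2.set (i-1) (p2.getD (i-1) 0 + k * left)) left right
        else
          spreadLoopA fuel' (start - 1) 0 ((k * left) :: p2) left right
      else
        spreadLoopA fuel' start (i+1) pile left right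
    else (start, pile)

def spread_the_coins (pile : List Int) (left : Int) (right : Int) : Int × List Int :=
  spreadLoopA (pvFuel pile) 0 0 pile left right

-- ===== PORT B =====
-- Source B's while loop over the two zipper stacks, with each Python stack represented head-first
-- (list head = stack top): before's head is the cell just left of the cursor, after's head is the
-- cursor cell. The fuel-0 result lists the remaining suffix so the guard never changes the value.
def spreadLoopB (fuel : Nat) (start : Int) (before after : List Int) (left right : Int) : Int × List Int :=
  match fuel with
  | 0 => (start, before.reverse ++ after)
  | Nat.succ fuel' =>
    match after with
    | [] => (start, before.reverse)
    | c :: rest =>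
      let k := PySem.Int.floordiv c (left + right)
      if k ≤ 0 then
        spreadLoopB fuel' start (c :: before) rest left right
      else
        let c' := c - k * (left + right)
        let rest' := match rest with
                     | r0 :: rs => (r0 + k * right) :: rs
                     | [] => [k * right]
        match before with
        | b0 :: bs => spreadLoopB fuel' start bs ((b0 + k * left) :: c' :: rest') left right
        | [] => spreadLoopB fuel' (start - 1) [] ((k * left) :: c' :: rest') left right

def spread_the_coins_alt (pile : List Int) (left : Int) (right : Int) : Int × List Int :=
  spreadLoopB (pvFuel pile) 0 [] pile left right

-- ===== PRECONDITION & SPEC =====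
-- Pre_ excludes exactly the nonempty piles with left + right == 0, where Python A (and Python B)
-- raises ZeroDivisionError at the first cursor cell; everywhere else the ports agree.
def Pre_spread_the_coins (pile : List Int) (left : Int) (right : Int) : Prop :=
  pile = [] ∨ left + right ≠ 0
instance (pile : List Int) (left : Int) (right : Int) : Decidable (Pre_spread_the_coins pile left right) := by
  unfold Pre_spread_the_coins; infer_instance

def pvWitness_spread_the_coins : List Int × Int × Int := ([4], 1, 1)

def Spec_spread_the_coins (pile : List Int) (left : Int) (right : Int) (out : Int × List Int) : Prop :=
  out = spread_the_coins_alt pile left right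
instance (pile : List Int) (left : Int) (right : Int) (out : Int × List Int) : Decidable (Spec_spread_the_coins pile left right out) := by
  unfold Spec_spread_the_coins; infer_instance

-- ===== CLAIM (what is proved, stated in full; the proofs are below) =====
def Claim_equal_spread_the_coins : Prop := ∀ (pile : List Int) (left : Int) (right : Int), Dom_spread_the_coins pile left right → Pre_spread_the_coins pile left right → Spec_spread_the_coins pile left right (spread_the_coins pile left right)

-- ===== LEMMAS AND PROOFS =====

-- Reading the cell just past a prefix.
theorem pv_getD_append_len {xs ys : List Int} {d : Int} :
    (xs ++ ys).getD xs.length d = ys.getD 0 d := by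
  induction xs with
  | nil => rfl
  | cons x xs ih => simpa using ih

-- Writing the cell just past a prefix.
theorem pv_set_append_len {xs ys : List Int} {v : Int} :
    (xs ++ ys).set xs.length v = xs ++ ys.set 0 v := by
  induction xs with
  | nil => rfl
  | cons x xs ih => simpa using ih

-- Positional reads/writes on a zipper-shaped list, as A performs them.
theorem pv_getD_mid (before rest : List Int) (c d : Int) :
    (before.reverse ++ c :: rest).getD before.length d = c := by
  rw [show before.length = before.reverse.length from (List.length_reverse (as := before)).symm,
    pv_getD_append_len]
  simp

theorem pv_set_mid (before rest : List Int) (c v : Int) :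
    (before.reverse ++ c :: rest).set before.length v = before.reverse ++ v :: rest := by
  rw [show before.length = before.reverse.length from (List.length_reverse (as := before)).symm,
    pv_set_append_len, List.set_cons_zero]

theorem pv_getD_mid1 (before rs : List Int) (c r0 d : Int) :
    (before.reverse ++ c :: r0 :: rs).getD (before.length + 1) d = r0 := by
  rw [show before.reverse ++ c :: r0 :: rs = (before.reverse ++ [c]) ++ r0 :: rs by simp,
    show before.length + 1 = (before.reverse ++ [c]).length by simp,
    pv_getD_append_len]
  simp

theorem pv_set_mid1 (before rs : List Int) (c r0 v : Int) :
    (before.reverse ++ c :: r0 :: rs).set (before.length + 1) v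
      = before.reverse ++ c :: v :: rs := by
  rw [show before.reverse ++ c :: r0 :: rs = (before.reverse ++ [c]) ++ r0 :: rs by simp,
    show before.length + 1 = (before.reverse ++ [c]).length by simp,
    pv_set_append_len, List.set_cons_zero]
  simp

theorem pv_getD_left (bs z : List Int) (b0 d : Int) :
    ((b0 :: bs).reverse ++ z).getD ((b0 :: bs).length - 1) d = b0 := by
  rw [show (b0 :: bs).reverse ++ z = bs.reverse ++ b0 :: z by simp,
    show (b0 :: bs).length - 1 = bs.length by simp]
  exact pv_getD_mid bs z b0 d

theorem pv_set_left (bs z : List Int) (b0 v : Int) :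
    ((b0 :: bs).reverse ++ z).set ((b0 :: bs).length - 1) v = bs.reverse ++ v :: z := by
  rw [show (b0 :: bs).reverse ++ z = bs.reverse ++ b0 :: z by simp,
    show (b0 :: bs).length - 1 = bs.length by simp]
  exact pv_set_mid bs z b0 v

-- Lockstep bisimulation: A's state (i, pile) with pile = before.reverse ++ after and
-- i = before.length is B's zipper state, for any fuel.
theorem pv_lockstep (left right : Int) :
    ∀ (fuel : Nat) (start : Int) (before after : List Int),
      spreadLoopA fuel start before.length (before.reverse ++ after) left right
        = spreadLoopB fuel start before after left right := by
  intro fuel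
  induction fuel with
  | zero => intro start before after; rfl
  | succ fuel' ih =>
    intro start before after
    rcases after with _ | ⟨c, rest⟩
    · -- loop exit
      rw [List.append_nil]
      simp only [spreadLoopA, spreadLoopB]
      rw [if_neg (show ¬ before.length < before.reverse.length by simp)]
    · by_cases hk : PySem.Int.floordiv c (left + right) ≤ 0
      · -- no fire: A advances the index, B pushes the cell onto the prefix
        simp only [spreadLoopA, spreadLoopB]
        rw [if_pos (show before.length < (before.reverse ++ c :: rest).length by simp),
          pv_getD_mid, if_neg (show ¬ 0 < PySem.Int.floordiv c (left + right) by omega),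
          if_pos hk,
          show before.reverse ++ c :: rest = (c :: before).reverse ++ rest by simp,
          show before.length + 1 = (c :: before).length by simp]
        exact ih start (c :: before) rest
      · have hk0 : 0 < PySem.Int.floordiv c (left + right) := by omega
        set k := PySem.Int.floordiv c (left + right) with hkdef
        simp only [spreadLoopA, spreadLoopB]
        rw [if_pos (show before.length < (before.reverse ++ c :: rest).length by simp),
          pv_getD_mid, if_pos hk0, if_neg (by omega : ¬ k ≤ 0), pv_set_mid]
        rcases rest with _ | ⟨r0, rs⟩
        · -- cursor is the last cell: A appends
          rw [if_neg (show ¬ before.length ≠ (before.reverse ++ c :: ([] : List Int)).length - 1 by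
                simp),
            show (before.reverse ++ [c - k * (left + right)]) ++ [k * right]
                = before.reverse ++ (c - k * (left + right)) :: [k * right] by simp]
          rcases before with _ | ⟨b0, bs⟩
          · rw [if_neg (show ¬ ([] : List Int).length ≠ 0 by simp)]
            simpa using ih (start - 1) [] (k * left :: (c - k * (left + right)) :: [k * right])
          · rw [if_pos (show (b0 :: bs).length ≠ 0 by simp), pv_getD_left, pv_set_left,
              show (b0 :: bs).length - 1 = bs.length by simp]
            exact ih start bs ((b0 + k * left) :: (c - k * (left + right)) :: [k * right])
        · -- cursor has a right neighbour in place
          rw [if_pos (show before.length ≠ (before.reverse ++ c :: r0 :: rs).length - 1 by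
                simp only [List.length_append, List.length_reverse, List.length_cons]; omega),
            pv_getD_mid1, pv_set_mid1]
          rcases before with _ | ⟨b0, bs⟩
          · rw [if_neg (show ¬ ([] : List Int).length ≠ 0 by simp)]
            simpa using
              ih (start - 1) [] (k * left :: (c - k * (left + right)) :: (r0 + k * right) :: rs)
          · rw [if_pos (show (b0 :: bs).length ≠ 0 by simp), pv_getD_left, pv_set_left,
              show (b0 :: bs).length - 1 = bs.length by simp]
            exact ih start bs ((b0 + k * left) :: (c - k * (left + right)) :: (r0 + k * right) :: rs)

-- ===== VERDICT (by name: the statement is the Claim_ definition above) =====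
theorem spread_the_coins_spec : Claim_equal_spread_the_coins := by
  unfold Claim_equal_spread_the_coins
  intro pile left right _ _
  unfold Spec_spread_the_coins spread_the_coins spread_the_coins_alt
  simpa using pv_lockstep left right (pvFuel pile) 0 [] pile
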